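-- pv_equiv track=rewrite | github.com/mirandrom/mcgill-nlp.github.io | src/python/add_publication.py | parse_issue_body
-- ===== SOURCE A (Python) =====
-- def parse_issue_body(body):
--     """
--     Parse the body of the issue and return a dictionary of the parsed data.
--     """
--     parsed = {}
--     k = None
--
--     for line in body.split("\n"):
--         if line.startswith("### "):
--             k = line.removeprefix("### ").strip().lower().replace(" ", "_")
--             parsed[k] = ""
--         else:
--             if k is not None:
--                 parsed[k] += line.strip()
--
--     return parsed
-- ===== SOURCE B (Python) =====
-- def parse_issue_body(body):
--     """
--     Parse the body of the issue and return a dictionary of the parsed data.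
--     """
--     # Phase 1: group lines into sections (header line, content lines),
--     # discarding any lines before the first header.
--     sections = []
--     for line in body.split("\n"):
--         if line.startswith("### "):
--             sections.append((line, []))
--         elif sections:
--             sections[-1][1].append(line)
--     # Phase 2: build the dict; a repeated header overwrites (last write wins,
--     # keeping the first insertion position, as Python dicts do).
--     parsed = {}
--     for header, content in sections:
--         key = header.removeprefix("### ").strip().lower().replace(" ", "_")
--         parsed[key] = "".join(l.strip() for l in content)
--     return parsed
-- ===== Notes on version B (the rewrite author's own statement) =====
-- stated objective: alternative
-- what changed: B replaces A's single stateful loop (current-key register plus in-place dict string appends) by a two-phase decomposition: first group lines into (header, content-lines) sections, then map each section to a key/joined-value dict entry.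
import Mathlib
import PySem

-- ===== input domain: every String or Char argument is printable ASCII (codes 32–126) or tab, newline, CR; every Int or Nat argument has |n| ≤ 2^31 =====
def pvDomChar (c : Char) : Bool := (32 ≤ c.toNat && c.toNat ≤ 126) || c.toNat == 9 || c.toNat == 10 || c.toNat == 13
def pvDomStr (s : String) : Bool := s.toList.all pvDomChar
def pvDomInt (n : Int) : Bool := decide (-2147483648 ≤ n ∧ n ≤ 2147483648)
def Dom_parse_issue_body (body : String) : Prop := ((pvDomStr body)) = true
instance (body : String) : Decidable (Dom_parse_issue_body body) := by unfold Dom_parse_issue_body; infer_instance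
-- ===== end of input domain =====

-- B restructures A's single stateful loop into a grouping pass followed by a mapping pass
-- (alternative decomposition, same cost); return values are proved equal on all of Dom.

-- ===== PORT A =====

-- str.removeprefix(p): exact hand port (PySem has no primitive for it)
def pvRemoveprefix (s p : String) : String :=
  if PySem.Str.startswith s p then String.ofList (s.toList.drop p.toList.length) else s

-- shared key normalisation: line.removeprefix("### ").strip().lower().replace(" ", "_")
def pvKey (line : String) : String :=
  PySem.Str.replace (PySem.Str.lower (PySem.Str.strip (pvRemoveprefix line "### "))) " " "_"

-- string concatenation a + b (exact; via toList so the kernel can evaluate it)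
def pvCat (a b : String) : String := String.ofList (a.toList ++ b.toList)

-- one iteration of A's loop over (parsed, k); `parsed[k] += line.strip()` is ported as
-- Dict.modify k "" (append): exact, since whenever k = some key that key is present in parsed
def pvStepA (st : PySem.Dict String String × Option String) (line : String) :
    PySem.Dict String String × Option String :=
  if PySem.Str.startswith line "### " then
    let k := pvKey line
    (st.1.insert k "", some k)
  else
    match st.2 with
    | some k => (st.1.modify k "" (fun v => pvCat v (PySem.Str.strip line)), st.2)
    | none => st

def parse_issue_body (body : String) : List (String × String) :=
  (((PySem.Str.split? body "\n").getD []).foldl pvStepA (PySem.Dict.empty, none)).1.items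

-- ===== PORT B =====

-- phase 1 loop body: start a new section on a header line, else append to the last section
def pvStepB (acc : List (String × List String)) (line : String) : List (String × List String) :=
  if PySem.Str.startswith line "### " then acc ++ [(line, [])]
  else
    match acc.getLast? with
    | none => acc
    | some s => acc.dropLast ++ [(s.1, s.2 ++ [line])]

-- "".join(l.strip() for l in content)
def pvJoinStrip (content : List String) : String :=
  PySem.Str.join "" (content.map PySem.Str.strip)

-- phase 2 loop body: parsed[key] = joined stripped content
def pvFin (d : PySem.Dict String String) (s : String × List String) : PySem.Dict String String :=
  d.insert (pvKey s.1) (pvJoinStrip s.2)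

def parse_issue_body_alt (body : String) : List (String × String) :=
  let sections := ((PySem.Str.split? body "\n").getD []).foldl pvStepB []
  (sections.foldl pvFin PySem.Dict.empty).items

-- ===== PRECONDITION & SPEC =====
def Spec_parse_issue_body (body : String) (out : List (String × String)) : Prop := out = parse_issue_body_alt body
instance (body : String) (out : List (String × String)) : Decidable (Spec_parse_issue_body body out) := by unfold Spec_parse_issue_body; infer_instance

-- ===== CLAIM (what is proved, stated in full; the proofs are below) =====
def Claim_equal_parse_issue_body : Prop := ∀ (body : String), Dom_parse_issue_body body → Spec_parse_issue_body body (parse_issue_body body)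

-- ===== LEMMAS AND PROOFS =====

lemma intersperse_nil_flatten (l : List (List Char)) :
    (List.intersperse ([] : List Char) l).flatten = l.flatten := by
  induction l with
  | nil => simp
  | cons x xs ih => cases xs <;> simp_all [List.intersperse]

lemma joinStrip_append (c : List String) (line : String) :
    pvJoinStrip (c ++ [line]) = pvCat (pvJoinStrip c) (PySem.Str.strip line) := by
  simp [pvJoinStrip, pvCat, PySem.Str.join, PySem.Chars.join, List.intercalate,
        intersperse_nil_flatten]

lemma joinStrip_nil : pvJoinStrip [] = "" := by decide

-- the loop invariant: A's running state (dict, current key) is determined by B's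
-- sections-so-far S: the dict is phase 2 applied to S, and the key is the last header's key
lemma pv_invariant (lines : List String) (d : PySem.Dict String String)
    (k : Option String) (S : List (String × List String))
    (hd : d = S.foldl pvFin PySem.Dict.empty)
    (hk : k = S.getLast?.map (fun s => pvKey s.1)) :
    (lines.foldl pvStepA (d, k)).1 =
      (lines.foldl pvStepB S).foldl pvFin PySem.Dict.empty := by
  induction lines generalizing d k S with
  | nil => simpa using hd
  | cons line rest ih =>
    simp only [List.foldl_cons]
    by_cases hstart : PySem.Str.startswith line "### "
    · rw [show pvStepB S line = S ++ [(line, [])] from by simp only [pvStepB, if_pos hstart],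
          show pvStepA (d, k) line = (d.insert (pvKey line) "", some (pvKey line)) from by
            simp only [pvStepA, if_pos hstart]]
      exact ih _ _ _ (by simp [hd, List.foldl_append, pvFin, joinStrip_nil]) (by simp)
    · rcases List.eq_nil_or_concat S with hS | ⟨I, s, hS⟩
      · subst hS
        simp only [List.getLast?_nil, Option.map_none] at hk
        subst hk
        rw [show pvStepB [] line = [] from by
              simp only [pvStepB, if_neg hstart, List.getLast?_nil],
            show pvStepA (d, none) line = (d, none) from by simp only [pvStepA, if_neg hstart]]
        exact ih _ _ _ hd rfl
      · rw [List.concat_eq_append] at hS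
        subst hS
        have hk' : k = some (pvKey s.1) := by simpa using hk
        rw [show pvStepB (I ++ [s]) line = I ++ [(s.1, s.2 ++ [line])] from by
              simp only [pvStepB, if_neg hstart, List.getLast?_concat, List.dropLast_concat],
            show pvStepA (d, k) line
                = (d.modify (pvKey s.1) "" (fun v => pvCat v (PySem.Str.strip line)), k) from by
              simp only [pvStepA, if_neg hstart, hk']]
        refine ih _ _ _ ?_ (by simp [hk'])
        rw [hd]
        simp only [List.foldl_append, List.foldl_cons, List.foldl_nil, pvFin,
          PySem.Dict.modify, PySem.Dict.getD_insert_self,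
          PySem.Dict.insert_insert_self, joinStrip_append]

-- ===== VERDICT (by name: the statement is the Claim_ definition above) =====
theorem parse_issue_body_spec : Claim_equal_parse_issue_body := by
  intro body _
  show parse_issue_body body = parse_issue_body_alt body
  have h := pv_invariant ((PySem.Str.split? body "\n").getD []) PySem.Dict.empty none [] rfl rfl
  simpa [parse_issue_body, parse_issue_body_alt] using congrArg PySem.Dict.items h
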